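-- pv_equiv track=rewrite | github.com/GyokayAli/MITx--6.00.1x-Introduction-to-Computer-Science-and-Programming-Using-Python | Quiz/laceStrings_quiz.py | laceStrings1
-- ===== SOURCE A (Python) =====
-- def laceStrings1(s1, s2):
--     """
--     s1 and s2 are strings.
--
--     Returns a new str with elements of s1 and s2 interlaced,
--     beginning with s1. If strings are not of same length,
--     then the extra elements should appear at the end.
--     """
--     if len( s1 ) > len( s2 ):
--         temp = s1
--     else:
--         temp = s2
--
--     result = ''
--     n = 0
--
--     while n < len( temp ):
--         if n < len( s1 ):
--             result += s1[n]
--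
--         if n < len( s2 ):
--             result += s2[n]
--
--         n += 1
--
--     return result
-- ===== SOURCE B (Python) =====
-- def laceStrings1(s1, s2):
--     m = min(len(s1), len(s2))
--     return ''.join(a + b for a, b in zip(s1, s2)) + s1[m:] + s2[m:]
-- ===== Notes on version B (the rewrite author's own statement) =====
-- stated objective: faster
-- what changed: Replaces the index-counter while loop with per-index bounds branches and repeated string += by a zip over the common prefix joined at once plus slice expressions for the leftover tail.
import Mathlib
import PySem

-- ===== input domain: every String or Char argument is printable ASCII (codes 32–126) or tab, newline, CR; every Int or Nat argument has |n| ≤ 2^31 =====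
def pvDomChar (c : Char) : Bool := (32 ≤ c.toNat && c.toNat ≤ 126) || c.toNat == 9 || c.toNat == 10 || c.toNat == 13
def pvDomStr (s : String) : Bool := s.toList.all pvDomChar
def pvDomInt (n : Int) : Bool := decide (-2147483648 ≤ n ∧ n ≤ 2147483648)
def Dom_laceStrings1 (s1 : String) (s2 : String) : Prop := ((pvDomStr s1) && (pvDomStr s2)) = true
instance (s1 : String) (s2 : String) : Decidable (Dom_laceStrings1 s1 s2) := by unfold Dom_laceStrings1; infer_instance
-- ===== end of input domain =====

-- B replaces A's index-counter while loop (with per-index bounds branches) by a zip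
-- over the common prefix plus slice expressions for the leftover tail; same result, same O(n) cost.

-- ===== PORT A =====
-- literal port of A: pick the longer string as `temp`, then a counter loop over its
-- indices, appending s1[n] and s2[n] when in range (the while loop is the foldl over range).
def laceStrings1 (s1 : String) (s2 : String) : String :=
  let l1 := s1.toList
  let l2 := s2.toList
  let temp := if l1.length > l2.length then l1 else l2
  let result := (List.range temp.length).foldl (fun r n =>
    let r := if n < l1.length then r ++ [l1[n]!] else r
    if n < l2.length then r ++ [l2[n]!] else r) []
  String.ofList result

-- ===== PORT B =====
-- literal port of Source B: zip the two strings, join the pairs, append the slices s1[m:] ++ s2[m:].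
def laceStrings1_alt (s1 : String) (s2 : String) : String :=
  let l1 := s1.toList
  let l2 := s2.toList
  let m : Nat := min l1.length l2.length
  String.ofList ((l1.zip l2).flatMap (fun p => [p.1, p.2])
    ++ PySem.List.slice l1 (some (m : Int)) none
    ++ PySem.List.slice l2 (some (m : Int)) none)

-- ===== PRECONDITION & SPEC =====
def Spec_laceStrings1 (s1 : String) (s2 : String) (out : String) : Prop := out = laceStrings1_alt s1 s2
instance (s1 : String) (s2 : String) (out : String) : Decidable (Spec_laceStrings1 s1 s2 out) := by unfold Spec_laceStrings1; infer_instance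

-- ===== CLAIM (what is proved, stated in full; the proofs are below) =====
def Claim_equal_laceStrings1 : Prop := ∀ (s1 : String) (s2 : String), Dom_laceStrings1 s1 s2 → Spec_laceStrings1 s1 s2 (laceStrings1 s1 s2)

-- ===== LEMMAS AND PROOFS =====

theorem pv_map_range_getElem! (l : List Char) :
    (List.range l.length).map (fun n => l[n]!) = l := by
  apply List.ext_getElem
  · simp
  · intro i h1 h2
    simp_all [List.getElem!_eq_getElem?_getD]

theorem pv_flat_single (l : List Char) :
    (List.range l.length).flatMap (fun n => if n < l.length then [l[n]!] else []) = l := by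
  have h1 : (List.range l.length).flatMap (fun n => if n < l.length then [l[n]!] else [])
      = (List.range l.length).flatMap (fun n => [l[n]!]) := by
    rw [List.flatMap, List.flatMap]
    congr 1
    apply List.map_congr_left
    intro n hn
    simp only [List.mem_range] at hn
    simp [hn]
  have h2 : ∀ (xs : List Nat) (f : Nat → Char), xs.flatMap (fun n => [f n]) = xs.map f := by
    intro xs f
    induction xs with
    | nil => rfl
    | cons x xs ih => simp [ih]
  rw [h1, h2, pv_map_range_getElem!]

theorem pv_key (l1 l2 : List Char) :
    (List.range (max l1.length l2.length)).flatMap (fun n =>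
        (if n < l1.length then [l1[n]!] else []) ++ (if n < l2.length then [l2[n]!] else []))
    = (l1.zip l2).flatMap (fun p => [p.1, p.2])
        ++ l1.drop (min l1.length l2.length) ++ l2.drop (min l1.length l2.length) := by
  induction l1 generalizing l2 with
  | nil =>
    have hfun : (fun n => (if n < (0 : Nat) then [([] : List Char)[n]!] else [])
          ++ (if n < l2.length then [l2[n]!] else []))
        = fun n => if n < l2.length then [l2[n]!] else [] := by
      funext n; simp
    rw [show (List.nil : List Char).length = 0 from rfl, Nat.zero_max, hfun, pv_flat_single l2]
    simp
  | cons a as ih =>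
    cases l2 with
    | nil =>
      have hfun : (fun n => (if n < (a :: as).length then [(a :: as)[n]!] else [])
            ++ (if n < (0 : Nat) then [([] : List Char)[n]!] else []))
          = fun n => if n < (a :: as).length then [(a :: as)[n]!] else [] := by
        funext n; simp
      rw [show (List.nil : List Char).length = 0 from rfl, Nat.max_zero, hfun]
      rw [pv_flat_single (a :: as)]
      simp
    | cons b bs =>
      have hmax : max (a :: as).length (b :: bs).length = max as.length bs.length + 1 := by
        simp [Nat.succ_max_succ]
      rw [hmax, List.range_succ_eq_map]
      simp only [List.flatMap_cons, List.flatMap_map]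
      have hfun : (fun n => ((fun n =>
            (if n < (a :: as).length then [(a :: as)[n]!] else []) ++
            (if n < (b :: bs).length then [(b :: bs)[n]!] else [])) (Nat.succ n)))
          = fun n => (if n < as.length then [as[n]!] else []) ++
            (if n < bs.length then [bs[n]!] else []) := by
        funext n
        simp
      rw [hfun, ih bs]
      simp [Nat.succ_min_succ]

theorem pv_fold_eq (l1 l2 : List Char) (N : Nat) (acc : List Char) :
    (List.range N).foldl (fun r n =>
        let r := if n < l1.length then r ++ [l1[n]!] else r
        if n < l2.length then r ++ [l2[n]!] else r) acc
    = acc ++ (List.range N).flatMap (fun n =>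
        (if n < l1.length then [l1[n]!] else []) ++ (if n < l2.length then [l2[n]!] else [])) := by
  have hstep : (fun (r : List Char) (n : Nat) =>
        let r := if n < l1.length then r ++ [l1[n]!] else r
        if n < l2.length then r ++ [l2[n]!] else r)
      = fun r n => r ++ ((if n < l1.length then [l1[n]!] else []) ++
          (if n < l2.length then [l2[n]!] else [])) := by
    funext r n
    by_cases h1 : n < l1.length <;> by_cases h2 : n < l2.length <;> simp [h1, h2]
  rw [hstep, PySem.List.foldl_append_eq_flatMap]

theorem pv_temp_len (l1 l2 : List Char) :
    (if l1.length > l2.length then l1 else l2).length = max l1.length l2.length := by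
  split <;> omega

-- ===== VERDICT (by name: the statement is the Claim_ definition above) =====
theorem laceStrings1_spec : Claim_equal_laceStrings1 := by
  intro s1 s2 _
  unfold Spec_laceStrings1 laceStrings1 laceStrings1_alt
  simp only [PySem.List.slice_from_natCast]
  rw [pv_fold_eq, pv_temp_len, pv_key]
  simp
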